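-- pv_equiv track=rewrite | github.com/gridvisi/Python_workspace | Zero 2 Hero Class/Class_Object/CopyDeepCopy.py | make_checkered_board
-- ===== SOURCE A (Python) =====
-- def make_checkered_board(n):
--     line=['X' for _ in range(n)]
--     #lines = copy.deepcopy(line)
--     board = [line[:] for _ in range(n)]  # why use line[:
--     for row in range(0,n):
--         for col in range(0,n):
--             if (row+col)%2:
--                 board[row][col]="O"
--     return board
-- ===== SOURCE B (Python) =====
-- def make_checkered_board(n):
--     pat = ['X', 'O'] * (n // 2 + 1)
--     return [pat[r % 2: r % 2 + n] for r in range(n)]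
-- ===== Notes on version B (the rewrite author's own statement) =====
-- stated objective: idiomatic
-- what changed: Builds one repeating ['X','O'] pattern once and takes a parity-shifted slice of it per row, replacing A's fill-with-X board plus nested per-cell overwrite loop.
import Mathlib
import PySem

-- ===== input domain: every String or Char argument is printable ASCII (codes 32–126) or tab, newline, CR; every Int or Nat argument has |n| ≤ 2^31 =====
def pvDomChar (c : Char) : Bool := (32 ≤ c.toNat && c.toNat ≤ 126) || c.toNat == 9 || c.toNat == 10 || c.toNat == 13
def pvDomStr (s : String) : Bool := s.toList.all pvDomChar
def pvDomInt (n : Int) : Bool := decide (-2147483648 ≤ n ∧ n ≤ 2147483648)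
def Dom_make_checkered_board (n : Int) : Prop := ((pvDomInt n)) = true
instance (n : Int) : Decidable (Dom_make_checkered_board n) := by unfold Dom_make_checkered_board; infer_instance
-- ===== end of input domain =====

-- B builds one repeating ['X','O'] pattern and takes a parity-shifted slice per row,
-- replacing A's fill-with-X board plus nested per-cell overwrite loop (objective: idiomatic).


-- ===== PORT A =====
def make_checkered_board (n : Int) : List (List String) :=
  let line : List String := (PySem.List.pyRange 0 n 1).map (fun _ => "X")
  let board : List (List String) :=
    (PySem.List.pyRange 0 n 1).map (fun _ => PySem.List.slice line none none)
  (PySem.List.pyRange 0 n 1).foldl (fun b row =>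
    (PySem.List.pyRange 0 n 1).foldl (fun b col =>
      if PySem.Int.mod (row + col) 2 ≠ 0 then
        PySem.List.pySetD b row (PySem.List.pySetD (PySem.List.pyGetD b row []) col "O")
      else b) b) board

-- ===== PORT B =====
-- Python list repetition: xs * k (k ≤ 0 gives []); exact for this use
def pyListMul {α : Type} (xs : List α) (k : Int) : List α :=
  (List.replicate k.toNat xs).flatten

def make_checkered_board_alt (n : Int) : List (List String) :=
  let pat : List String := pyListMul ["X", "O"] (PySem.Int.floordiv n 2 + 1)
  (PySem.List.pyRange 0 n 1).map (fun r =>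
    PySem.List.slice pat (some (PySem.Int.mod r 2)) (some (PySem.Int.mod r 2 + n)))

-- ===== PRECONDITION & SPEC =====
def Spec_make_checkered_board (n : Int) (out : List (List String)) : Prop := out = make_checkered_board_alt n
instance (n : Int) (out : List (List String)) : Decidable (Spec_make_checkered_board n out) := by unfold Spec_make_checkered_board; infer_instance

-- ===== CLAIM (what is proved, stated in full; the proofs are below) =====
def Claim_equal_make_checkered_board : Prop := ∀ (n : Int), Dom_make_checkered_board n → Spec_make_checkered_board n (make_checkered_board n)

-- ===== LEMMAS AND PROOFS =====

-- the common description of the board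
def rowT (n r : Nat) : List String :=
  (List.range n).map (fun c => if (r + c) % 2 = 0 then "X" else "O")

def boardT (n : Nat) : List (List String) :=
  (List.range n).map (fun r => rowT n r)

-- setting an element of a map-over-range is a map-over-range
theorem set_map_range {α : Type} (f : Nat → α) (n k : Nat) (v : α) :
    ((List.range n).map f).set k v
      = (List.range n).map (fun i => if i = k then v else f i) := by
  apply List.ext_getElem
  · simp
  · intro i h1 h2
    simp only [List.getElem_set, List.getElem_map, List.getElem_range]
    by_cases h : k = i <;> simp [h, eq_comm]

theorem map_range_congr {α : Type} (f g : Nat → α) (n : Nat)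
    (h : ∀ i, i < n → f i = g i) :
    (List.range n).map f = (List.range n).map g := by
  apply List.map_congr_left
  intro i hi
  exact h i (List.mem_range.mp hi)

-- the repeated pattern, elementwise
theorem pat_getElem (k i : Nat) (h : i < ((List.replicate k (["X", "O"] : List String)).flatten).length) :
    ((List.replicate k (["X", "O"] : List String)).flatten)[i]
      = if i % 2 = 0 then "X" else "O" := by
  induction k generalizing i with
  | zero => simp at h
  | succ k ih =>
    match i with
    | 0 => simp [List.replicate_succ]
    | 1 => simp [List.replicate_succ]
    | (i + 2) =>
      simp only [List.replicate_succ, List.flatten_cons] at h ⊢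
      have h' : i < ((List.replicate k (["X", "O"] : List String)).flatten).length := by
        simp at h; simpa using h
      have := ih i h'
      simp only [List.cons_append, List.nil_append]
      show ((List.replicate k (["X", "O"] : List String)).flatten)[i] = _
      rw [this]
      have : (i + 2) % 2 = i % 2 := by omega
      rw [this]

def rowMid (n r j : Nat) : List String :=
  (List.range n).map (fun c => if c < j ∧ (r + c) % 2 ≠ 0 then "O" else "X")

def boardMid (n r j : Nat) : List (List String) :=
  (List.range n).map (fun q =>
    if q < r then rowT n q else if q = r then rowMid n r j else List.replicate n "X")

theorem pyMod_two_cast (r : Nat) : PySem.Int.mod (r : Int) 2 = ((r % 2 : Nat) : Int) := by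
  exact_mod_cast PySem.Int.mod_natCast r 2

theorem pyMod_two_add_cast (r c : Nat) :
    PySem.Int.mod ((r : Int) + (c : Int)) 2 = (((r + c) % 2 : Nat) : Int) := by
  have : ((r : Int) + (c : Int)) = ((r + c : Nat) : Int) := by push_cast; ring
  rw [this]
  exact_mod_cast PySem.Int.mod_natCast (r + c) 2

-- inner loop of A, characterised
theorem inner_loop (n r : Nat) (hr : r < n) :
    ∀ j, j ≤ n →
      (PySem.List.pyRange 0 (j : Int) 1).foldl (fun b col =>
        if PySem.Int.mod ((r : Int) + col) 2 ≠ 0 then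
          PySem.List.pySetD b (r : Int) (PySem.List.pySetD (PySem.List.pyGetD b (r : Int) []) col "O")
        else b) (boardMid n r 0)
      = boardMid n r j := by
  intro j hj
  induction j with
  | zero => simp [PySem.List.pyRange_one_eq_nil]
  | succ j ih =>
    have hjn : j ≤ n := by omega
    have hjlt : j < n := by omega
    have hsplit : PySem.List.pyRange 0 ((j : Int) + 1) 1
        = PySem.List.pyRange 0 (j : Int) 1 ++ [(j : Int)] := by
      exact PySem.List.pyRange_one_succ_right (by exact_mod_cast Nat.zero_le j)
    have : ((j + 1 : Nat) : Int) = (j : Int) + 1 := by push_cast; ring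
    rw [this, hsplit, List.foldl_append, ih hjn]
    simp only [List.foldl_cons, List.foldl_nil]
    rw [pyMod_two_add_cast r j]
    by_cases hpar : (r + j) % 2 = 0
    · -- no write: rowMid unchanged at column j
      simp only [hpar]
      norm_num
      unfold boardMid
      apply map_range_congr
      intro q hq
      by_cases h1 : q < r
      · simp [h1]
      · by_cases h2 : q = r
        · simp [h2]
          unfold rowMid
          apply map_range_congr
          intro c hc
          by_cases hcj : c < j
          · simp [hcj, Nat.lt_succ_of_lt hcj]
          · have : ¬ (c < j + 1) ∨ c = j := by omega
            rcases this with h | h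
            · simp [hcj, h]
            · subst h
              simp [hpar]
        · simp [h1, h2]
    · -- write "O" at (r, j)
      have hne : (((r + j) % 2 : Nat) : Int) ≠ 0 := by
        intro h; apply hpar; exact_mod_cast h
      simp only [hne, if_pos, ne_eq, not_false_iff]
      norm_num
      unfold boardMid
      have hgetr : (((List.range n).map (fun q =>
          if q < r then rowT n q else if q = r then rowMid n r j else List.replicate n "X"))[r]?).getD []
          = rowMid n r j := by
        rw [List.getElem?_eq_getElem (by simpa using hr)]
        simp
      rw [hgetr]
      unfold rowMid
      rw [set_map_range, set_map_range]
      apply map_range_congr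
      intro q hq
      by_cases h2 : q = r
      · subst h2
        simp only
        have : ¬ q < q := by omega
        simp only [this, if_false]
        apply map_range_congr
        intro c hc
        by_cases hcj : c = j
        · subst hcj
          simp [hpar]
        · by_cases hcl : c < j
          · simp [hcj, hcl, Nat.lt_succ_of_lt hcl]
          · have : ¬ c < j + 1 := by omega
            simp [hcj, hcl, this]
      · simp [h2]

theorem boardMid_zero (n r : Nat) :
    boardMid n r 0 = (List.range n).map (fun q =>
      if q < r then rowT n q else List.replicate n "X") := by
  unfold boardMid
  apply map_range_congr
  intro q hq
  by_cases h1 : q < r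
  · simp [h1]
  · by_cases h2 : q = r
    · subst h2
      simp only [h1, if_false]
      unfold rowMid
      apply List.ext_getElem
      · simp
      · intro i hi1 hi2
        simp
    · simp [h1, h2]

theorem boardMid_full (n r : Nat) (hr : r < n) :
    boardMid n r n = (List.range n).map (fun q =>
      if q < r + 1 then rowT n q else List.replicate n "X") := by
  unfold boardMid
  apply map_range_congr
  intro q hq
  by_cases h1 : q < r
  · simp [h1, Nat.lt_succ_of_lt h1]
  · by_cases h2 : q = r
    · subst h2
      simp only [h1, if_false, if_pos (Nat.lt_succ_self q)]
      unfold rowMid rowT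
      apply map_range_congr
      intro c hc
      by_cases hp : (q + c) % 2 = 0
      · simp [hp]
      · simp [hp, hc]
    · have : ¬ q < r + 1 := by omega
      simp [h1, h2, this]

-- outer loop of A, characterised
theorem outer_loop (n : Nat) :
    ∀ i, i ≤ n →
      (PySem.List.pyRange 0 (i : Int) 1).foldl (fun b row =>
        (PySem.List.pyRange 0 (n : Int) 1).foldl (fun b col =>
          if PySem.Int.mod (row + col) 2 ≠ 0 then
            PySem.List.pySetD b row (PySem.List.pySetD (PySem.List.pyGetD b row []) col "O")
          else b) b)
        ((List.range n).map (fun _ => List.replicate n "X"))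
      = (List.range n).map (fun q => if q < i then rowT n q else List.replicate n "X") := by
  intro i hi
  induction i with
  | zero => simp [PySem.List.pyRange_one_eq_nil]
  | succ i ih =>
    have hin : i ≤ n := by omega
    have hilt : i < n := by omega
    have hsplit : PySem.List.pyRange 0 ((i : Int) + 1) 1
        = PySem.List.pyRange 0 (i : Int) 1 ++ [(i : Int)] := by
      exact PySem.List.pyRange_one_succ_right (by exact_mod_cast Nat.zero_le i)
    have hcast : ((i + 1 : Nat) : Int) = (i : Int) + 1 := by push_cast; ring
    rw [hcast, hsplit, List.foldl_append, ih hin]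
    simp only [List.foldl_cons, List.foldl_nil]
    have hstart : (List.range n).map (fun q => if q < i then rowT n q else List.replicate n "X")
        = boardMid n i 0 := by rw [boardMid_zero]
    rw [hstart, inner_loop n i hilt n (le_refl n), boardMid_full n i hilt]

-- Port A computes boardT
theorem A_eq (n : Nat) : make_checkered_board (n : Int) = boardT n := by
  unfold make_checkered_board
  simp only [PySem.List.slice_none_none]
  have hstart : (PySem.List.pyRange 0 (n : Int) 1).map
      (fun _ => (PySem.List.pyRange 0 (n : Int) 1).map (fun _ => ("X" : String)))
      = (List.range n).map (fun _ => List.replicate n "X") := by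
    rw [PySem.List.pyRange_one]
    simp [List.map_map, Function.comp_def]
  rw [hstart, outer_loop n n (le_refl n)]
  unfold boardT
  apply map_range_congr
  intro q hq
  simp [hq]

-- the pattern has enough length
theorem pat_length (n : Nat) :
    ((List.replicate (n / 2 + 1) (["X", "O"] : List String)).flatten).length = 2 * (n / 2 + 1) := by
  induction (n / 2 + 1) with
  | zero => simp
  | succ k ih => simp [List.replicate_succ, ih]; omega

-- Port B computes boardT
theorem B_eq (n : Nat) : make_checkered_board_alt (n : Int) = boardT n := by
  unfold make_checkered_board_alt pyListMul
  have hdiv : PySem.Int.floordiv (n : Int) 2 + 1 = ((n / 2 + 1 : Nat) : Int) := by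
    rw [show ((2 : Int)) = ((2 : Nat) : Int) from rfl]
    rw [PySem.Int.floordiv_natCast n 2]
    push_cast; ring
  rw [hdiv]
  have htoNat : ((n / 2 + 1 : Nat) : Int).toNat = n / 2 + 1 := by omega
  rw [htoNat]
  rw [PySem.List.pyRange_one]
  simp only [sub_zero, Int.toNat_natCast, List.map_map]
  unfold boardT
  apply map_range_congr
  intro r hr
  simp only [Function.comp_apply, zero_add]
  rw [pyMod_two_cast r]
  rw [PySem.List.slice_natCast_add]
  -- (pat.drop (r % 2)).take n = rowT n r
  apply List.ext_getElem
  · rw [List.length_take, List.length_drop, pat_length]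
    have : r % 2 < 2 := Nat.mod_lt r (by omega)
    unfold rowT
    simp only [List.length_map, List.length_range]
    omega
  · intro c h1 h2
    have hlen := pat_length n
    have hr2 : r % 2 < 2 := Nat.mod_lt r (by omega)
    have hcn : c < n := by
      unfold rowT at h2; simpa using h2
    rw [List.getElem_take, List.getElem_drop]
    rw [pat_getElem (n / 2 + 1) (r % 2 + c) (by rw [hlen]; omega)]
    unfold rowT
    have : (r % 2 + c) % 2 = (r + c) % 2 := by omega
    simp [this]

-- ===== VERDICT (by name: the statement is the Claim_ definition above) =====
theorem make_checkered_board_spec : Claim_equal_make_checkered_board := by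
  intro n _
  unfold Spec_make_checkered_board
  by_cases hn : 0 ≤ n
  · have : n = ((n.toNat : Nat) : Int) := by omega
    rw [this, A_eq, B_eq]
  · have hle : n ≤ 0 := by omega
    have hnil : PySem.List.pyRange 0 n 1 = [] := PySem.List.pyRange_one_eq_nil hle
    unfold make_checkered_board make_checkered_board_alt
    rw [hnil]
    simp
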